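-- pv_equiv track=rewrite | github.com/nad-garraz/algoUno | labo-codigo/7_guia/7_clase.py | filas_misma_longitud
-- ===== SOURCE A (Python) =====
-- def filas_misma_longitud(s: list[list[int]]) -> bool:
--     long: int = len(s[0])
--     res: bool = True
--
--     if long == 0:
--         res = False
--     else:
--         ind: int = 1
--         while res and ind < len(s):
--             res = len(s[ind]) == long
--             ind += 1
--     return res
-- ===== SOURCE B (Python) =====
-- def filas_misma_longitud(s: list[list[int]]) -> bool:
--     first = len(s[0])
--     lengths = {len(row) for row in s}
--     return first != 0 and len(lengths) == 1
-- ===== Notes on version B (the rewrite author's own statement) =====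
-- stated objective: simpler
-- what changed: Replaces the index-based early-exit while loop with a running boolean by a set comprehension of all row lengths and a cardinality-1 check.
-- outside the precondition, e.g. on filas_misma_longitud([]): A raises IndexError, B raises IndexError
import Mathlib
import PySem

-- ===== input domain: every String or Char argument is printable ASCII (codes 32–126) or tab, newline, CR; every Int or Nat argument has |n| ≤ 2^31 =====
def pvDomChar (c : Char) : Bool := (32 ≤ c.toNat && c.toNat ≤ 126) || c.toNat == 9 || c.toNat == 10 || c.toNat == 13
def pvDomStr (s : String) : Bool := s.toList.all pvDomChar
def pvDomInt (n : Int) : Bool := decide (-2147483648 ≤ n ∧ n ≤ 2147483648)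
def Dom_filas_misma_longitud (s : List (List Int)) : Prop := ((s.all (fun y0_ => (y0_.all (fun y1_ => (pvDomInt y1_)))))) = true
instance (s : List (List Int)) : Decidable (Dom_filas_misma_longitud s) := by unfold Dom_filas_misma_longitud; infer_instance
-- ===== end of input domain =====

-- B replaces A's index-based early-exit while loop by a set of all row lengths and a
-- cardinality-1 check (objective: simpler). Return-value equivalence on nonempty s; both raise on s = [].

-- ===== PORT A =====
-- the 'while res and ind < len(s)' loop, step for step
def filasALoop (s : List (List Int)) (long : Nat) (ind : Nat) (res : Bool) : Bool :=
  if res = true ∧ ind < s.length then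
    filasALoop s long (ind + 1) (decide ((s.getD ind []).length = long))
  else res
termination_by s.length - ind

def filas_misma_longitud (s : List (List Int)) : Bool :=
  match PySem.List.pyGet? s 0 with
  | none => false          -- unreachable under Pre_ (Python raises IndexError here)
  | some r0 =>
    let long : Nat := r0.length
    if long = 0 then false
    else filasALoop s long 1 true

-- ===== PORT B =====
def filas_misma_longitud_alt (s : List (List Int)) : Bool :=
  match PySem.List.pyGet? s 0 with
  | none => false          -- unreachable under Pre_ (Python raises IndexError here)
  | some r0 =>
    let first : Nat := r0.length
    let lengths : PySem.Set Int := PySem.Set.ofList (s.map (fun row => (row.length : Int)))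
    decide (first ≠ 0) && decide (PySem.Set.len lengths = 1)

-- ===== PRECONDITION & SPEC =====
-- Pre_ excludes only s = [], where both Pythons raise IndexError on s[0].
def Pre_filas_misma_longitud (s : List (List Int)) : Prop := s ≠ []
instance (s : List (List Int)) : Decidable (Pre_filas_misma_longitud s) := by unfold Pre_filas_misma_longitud; infer_instance
def pvWitness_filas_misma_longitud : List (List Int) := [[1], [2]]

def Spec_filas_misma_longitud (s : List (List Int)) (out : Bool) : Prop := out = filas_misma_longitud_alt s
instance (s : List (List Int)) (out : Bool) : Decidable (Spec_filas_misma_longitud s out) := by unfold Spec_filas_misma_longitud; infer_instance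

-- ===== CLAIM (what is proved, stated in full; the proofs are below) =====
def Claim_equal_filas_misma_longitud : Prop := ∀ (s : List (List Int)), Dom_filas_misma_longitud s → Pre_filas_misma_longitud s → Spec_filas_misma_longitud s (filas_misma_longitud s)

-- ===== LEMMAS AND PROOFS =====

theorem filasALoop_false (s : List (List Int)) (long ind : Nat) :
    filasALoop s long ind false = false := by
  unfold filasALoop; simp

theorem filasALoop_true (k : Nat) : ∀ (s : List (List Int)) (long ind : Nat),
    s.length ≤ ind + k →
    filasALoop s long ind true = (s.drop ind).all (fun r => decide (r.length = long)) := by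
  induction k with
  | zero =>
    intro s long ind h
    unfold filasALoop
    rw [if_neg (by omega), List.drop_eq_nil_of_le (by omega)]
    simp
  | succ k ih =>
    intro s long ind h
    by_cases hlt : ind < s.length
    · unfold filasALoop
      rw [if_pos ⟨rfl, hlt⟩]
      have hdrop : s.drop ind = s[ind] :: s.drop (ind + 1) :=
        List.drop_eq_getElem_cons hlt
      have hgd : s.getD ind [] = s[ind] := by
        simp [List.getD_eq_getElem?_getD, List.getElem?_eq_getElem hlt]
      by_cases hd : s[ind].length = long
      · rw [hgd, decide_eq_true hd, ih s long (ind + 1) (by omega), hdrop, List.all_cons]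
        simp [hd]
      · rw [hgd, decide_eq_false hd, filasALoop_false, hdrop, List.all_cons]
        simp [hd]
    · unfold filasALoop
      rw [if_neg (by omega), List.drop_eq_nil_of_le (by omega)]
      simp

-- length of a Set.add-fold only grows
theorem foldl_add_len_mono (ys : List Int) : ∀ (acc : PySem.Set Int),
    acc.length ≤ (ys.foldl PySem.Set.add acc).length := by
  induction ys with
  | nil => intro acc; simp
  | cons y ys ih =>
    intro acc
    have := ih (PySem.Set.add acc y)
    have hadd : acc.length ≤ (PySem.Set.add acc y).length := by
      unfold PySem.Set.add; split <;> simp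
    simpa [List.foldl_cons] using le_trans hadd this

-- the fold starting from [x] stays a singleton iff every later element equals x
theorem foldl_add_singleton (ys : List Int) : ∀ (x : Int),
    ((ys.foldl PySem.Set.add [x]).length = 1 ↔ ∀ y ∈ ys, y = x) := by
  induction ys with
  | nil => intro x; simp
  | cons y ys ih =>
    intro x
    by_cases hy : y = x
    · subst hy
      have hadd : PySem.Set.add [y] y = [y] := by
        unfold PySem.Set.add; simp [PySem.Set.contains]
      rw [List.foldl_cons, hadd]; simp [ih y]
      
    · have hadd : PySem.Set.add [x] y = [x, y] := by
        unfold PySem.Set.add; simp [PySem.Set.contains, hy]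
      have hmono := foldl_add_len_mono ys [x, y]
      constructor
      · intro h
        rw [List.foldl_cons, hadd] at h
        simp at hmono; omega
      · intro h
        exact absurd (h y (by simp)) hy

theorem ofList_map_len_cons (r0 : List Int) (rest : List (List Int)) :
    ((PySem.Set.ofList ((r0.length : Int) :: rest.map (fun row => (row.length : Int)))).length = 1)
      ↔ ∀ r ∈ rest, r.length = r0.length := by
  have h1 : PySem.Set.ofList ((r0.length : Int) :: rest.map (fun row => (row.length : Int)))
      = (rest.map (fun row => (row.length : Int))).foldl PySem.Set.add [(r0.length : Int)] := by
    rw [PySem.Set.ofList_eq_foldl]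
    simp only [List.foldl_cons]
    congr 1
  rw [h1, foldl_add_singleton]
  constructor
  · intro h r hr
    have := h (r.length : Int) (by simp; exact ⟨r, hr, rfl⟩)
    exact_mod_cast this
  · intro h y hy
    simp at hy
    obtain ⟨r, hr, rfl⟩ := hy
    exact_mod_cast h r hr

-- ===== VERDICT (by name: the statement is the Claim_ definition above) =====
theorem filas_misma_longitud_spec : Claim_equal_filas_misma_longitud := by
  intro s _ hpre
  unfold Spec_filas_misma_longitud
  obtain ⟨r0, rest, rfl⟩ : ∃ r0 rest, s = r0 :: rest := by
    cases s with
    | nil => exact absurd rfl hpre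
    | cons a l => exact ⟨a, l, rfl⟩
  unfold filas_misma_longitud filas_misma_longitud_alt
  rw [PySem.List.pyGet?_zero_cons]
  dsimp only
  by_cases h0 : r0.length = 0
  · simp [h0]
  · rw [if_neg h0]
    rw [filasALoop_true (r0 :: rest).length (r0 :: rest) r0.length 1 (by omega)]
    simp only [List.drop_one, List.tail_cons, List.map_cons]
    have hset := ofList_map_len_cons r0 rest
    by_cases hall : ∀ r ∈ rest, r.length = r0.length
    · rw [List.all_eq_true.2 (fun r hr => decide_eq_true (hall r hr))]
      simp [PySem.Set.len, h0, hset.2 hall]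
    · obtain ⟨r, hr, hne⟩ : ∃ r ∈ rest, r.length ≠ r0.length := by
        by_contra hc
        exact hall (fun r hr => by by_contra hne; exact hc ⟨r, hr, hne⟩)
      rw [List.all_eq_false.2 ⟨r, hr, by simpa using hne⟩]
      have hnl : ¬ (PySem.Set.ofList ((r0.length : Int) :: rest.map (fun row => (row.length : Int)))).length = 1 :=
        fun h => hne ((hset.1 h) r hr)
      simp [PySem.Set.len, hnl]
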